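-- pv_equiv track=rewrite | github.com/Fr1tzBot/CodeStuff | PythonStuff/Borked/Make.confConfigurator.py | formatIndex
-- ===== SOURCE A (Python) =====
-- def formatIndex(index):
--     cleanedIndex = []
--     index = index.split("\n")
--     for i in range(len(index)):
--         if "<table" in index[i]:
--             index = index[i:]
--             break
--
--     for i in range(len(index)):
--         if "</table" in index[i]:
--             index = index[:i+1]
--             break
--
--     for i in index:
--         if "<th>" in i or "<td>" in i:
--             cleanedIndex.append(i)
--     return cleanedIndex
-- ===== SOURCE B (Python) =====
-- def formatIndex(index):
--     lines = index.split("\n")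
--     collecting = not any("<table" in line for line in lines)
--     cleaned = []
--     for line in lines:
--         if not collecting:
--             if "<table" in line:
--                 collecting = True
--             else:
--                 continue
--         if "<th>" in line or "<td>" in line:
--             cleaned.append(line)
--         if "</table" in line:
--             break
--     return cleaned
-- ===== Notes on version B (the rewrite author's own statement) =====
-- stated objective: simpler
-- what changed: Replaced A's three separate passes (index-scan + slice for <table, index-scan + slice for </table, then a filter loop) by one pass over the lines with a boolean collecting state (plus a pre-check for whether a <table line exists, which preserves A's collect-from-the-start behaviour when there is none).
import Mathlib
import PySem

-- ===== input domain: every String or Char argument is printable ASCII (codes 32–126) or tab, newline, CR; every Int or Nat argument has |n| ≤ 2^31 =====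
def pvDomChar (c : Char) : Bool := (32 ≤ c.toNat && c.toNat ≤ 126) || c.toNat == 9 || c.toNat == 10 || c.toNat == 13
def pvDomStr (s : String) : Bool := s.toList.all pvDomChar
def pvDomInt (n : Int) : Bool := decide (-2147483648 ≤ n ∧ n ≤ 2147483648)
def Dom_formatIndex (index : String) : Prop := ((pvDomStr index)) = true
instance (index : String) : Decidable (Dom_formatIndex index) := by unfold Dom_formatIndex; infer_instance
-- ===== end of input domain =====

-- B replaces A's three passes (scan+slice at '<table', scan+slice at '</table', filter) by a
-- single pass with a boolean 'collecting' state; return values are proved equal on all inputs.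

-- ===== PORT A =====
-- the three substring tests A and B both perform, named once
def pvHasOpen (l : String) : Bool := PySem.Str.isIn "<table" l
def pvHasClose (l : String) : Bool := PySem.Str.isIn "</table" l
def pvHasCell (l : String) : Bool := PySem.Str.isIn "<th>" l || PySem.Str.isIn "<td>" l

-- for i in range(len(index)): if "<table" in index[i]: index = index[i:]; break
def pvLoopTable (lines : List String) (i : Nat) : List String :=
  if h : i < lines.length then
    if pvHasOpen lines[i] then PySem.List.slice lines (some (i : Int)) none
    else pvLoopTable lines (i + 1)
  else lines
termination_by lines.length - i

-- for i in range(len(index)): if "</table" in index[i]: index = index[:i+1]; break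
def pvLoopClose (lines : List String) (i : Nat) : List String :=
  if h : i < lines.length then
    if pvHasClose lines[i] then PySem.List.slice lines none (some ((i : Int) + 1))
    else pvLoopClose lines (i + 1)
  else lines
termination_by lines.length - i

def formatIndex (index : String) : List String :=
  let lines0 := (PySem.Str.split? index "\n").getD []
  let lines1 := pvLoopTable lines0 0
  let lines2 := pvLoopClose lines1 0
  lines2.foldl (fun acc i => if pvHasCell i then acc ++ [i] else acc) []

-- ===== PORT B =====
-- the single for-loop of Source B: skip while not collecting, collect th/td lines, break at </table
def pvScan : List String → Bool → List String
  | [], _ => []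
  | l :: ls, collecting =>
    if !collecting && !pvHasOpen l then pvScan ls collecting
    else
      let acc := if pvHasCell l then [l] else []
      if pvHasClose l then acc else acc ++ pvScan ls true

def formatIndex_alt (index : String) : List String :=
  let lines := (PySem.Str.split? index "\n").getD []
  let collecting := !(lines.any pvHasOpen)
  pvScan lines collecting

-- ===== PRECONDITION & SPEC =====
def Spec_formatIndex (index : String) (out : List String) : Prop := out = formatIndex_alt index
instance (index : String) (out : List String) : Decidable (Spec_formatIndex index out) := by unfold Spec_formatIndex; infer_instance

-- ===== CLAIM (what is proved, stated in full; the proofs are below) =====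
def Claim_equal_formatIndex : Prop := ∀ (index : String), Dom_formatIndex index → Spec_formatIndex index (formatIndex index)

-- ===== LEMMAS AND PROOFS =====

-- truncate after the first line containing "</table" (inclusive); whole list if none
def pvTakeIncl : List String → List String
  | [] => []
  | l :: ls => if pvHasClose l then [l] else l :: pvTakeIncl ls

theorem pvLoopClose_eq (lines : List String) (i : Nat) :
    pvLoopClose lines i = lines.take i ++ pvTakeIncl (lines.drop i) := by
  induction h : lines.length - i generalizing i with
  | zero =>
    rw [pvLoopClose]
    have hlen : ¬ i < lines.length := by omega
    have hd : lines.drop i = [] := List.drop_eq_nil_of_le (by omega)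
    have htk : lines.take i = lines := List.take_of_length_le (by omega)
    simp [hlen, hd, htk, pvTakeIncl]
  | succ n ih =>
    have hlt : i < lines.length := by omega
    rw [pvLoopClose]
    simp only [hlt, dif_pos]
    have hdrop : lines.drop i = lines[i] :: lines.drop (i + 1) :=
      List.drop_eq_getElem_cons hlt
    have hcast : ((i : Int) + 1) = ((i + 1 : Nat) : Int) := by push_cast; ring
    have hget : lines[i]?.toList = [lines[i]] := by
      rw [List.getElem?_eq_getElem hlt]; rfl
    cases hc : pvHasClose lines[i] with
    | true =>
      rw [if_pos rfl, hcast, PySem.List.slice_to_natCast, hdrop, pvTakeIncl,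
        if_pos hc, List.take_add_one, hget]
    | false =>
      rw [if_neg (by simp), ih (i + 1) (by omega), hdrop, pvTakeIncl,
        if_neg (by rw [hc]; simp), List.take_add_one, hget, List.append_assoc]
      rfl

theorem pvLoopTable_eq (lines : List String) (i : Nat) :
    pvLoopTable lines i =
      if (lines.drop i).any pvHasOpen then
        (lines.drop i).dropWhile (fun l => !pvHasOpen l)
      else lines := by
  induction h : lines.length - i generalizing i with
  | zero =>
    rw [pvLoopTable]
    have hlen : ¬ i < lines.length := by omega
    have hd : lines.drop i = [] := List.drop_eq_nil_of_le (by omega)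
    simp [hlen, hd]
  | succ n ih =>
    have hlt : i < lines.length := by omega
    rw [pvLoopTable]
    simp only [hlt, dif_pos]
    have hdrop : lines.drop i = lines[i] :: lines.drop (i + 1) :=
      List.drop_eq_getElem_cons hlt
    cases ht : pvHasOpen lines[i] with
    | true =>
      rw [if_pos rfl, PySem.List.slice_from_natCast,
        if_pos (show (List.drop i lines).any pvHasOpen = true by
          rw [hdrop, List.any_cons, ht]; simp),
        hdrop, List.dropWhile_cons]
      simp [ht]
    | false =>
      rw [if_neg (by simp), ih (i + 1) (by omega),
        show (List.drop i lines).any pvHasOpen = (List.drop (i + 1) lines).any pvHasOpen by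
          rw [hdrop, List.any_cons, ht]; simp,
        show List.dropWhile (fun l => !pvHasOpen l) (List.drop i lines)
            = List.dropWhile (fun l => !pvHasOpen l) (List.drop (i + 1) lines) by
          rw [hdrop, List.dropWhile_cons]; simp [ht]]

-- B's loop with collecting = true is A's truncate-then-filter
theorem pvScan_true (lines : List String) :
    pvScan lines true = (pvTakeIncl lines).filter pvHasCell := by
  induction lines with
  | nil => simp [pvScan, pvTakeIncl]
  | cons l ls ih =>
    rw [pvScan, pvTakeIncl]
    cases hc : pvHasClose l with
    | true => cases hcell : pvHasCell l <;> simp [hcell]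
    | false => cases hcell : pvHasCell l <;> simp [hcell, ih]

-- B's loop with collecting = false skips to the first "<table" line, given one exists
theorem pvScan_false (lines : List String)
    (h : lines.any pvHasOpen = true) :
    pvScan lines false = pvScan (lines.dropWhile (fun l => !pvHasOpen l)) true := by
  induction lines with
  | nil => simp at h
  | cons l ls ih =>
    cases ht : pvHasOpen l with
    | true =>
      rw [List.dropWhile_cons]
      simp only [ht, Bool.not_true, Bool.false_eq_true, if_false]
      rw [pvScan, pvScan]
      simp [ht]
    | false =>
      rw [List.dropWhile_cons]
      simp only [ht, Bool.not_false, if_true]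
      rw [pvScan]
      simp only [ht, Bool.not_false, Bool.and_true]
      have h' : ls.any pvHasOpen = true := by
        rw [List.any_cons, ht] at h; simpa using h
      simpa using ih h'

-- ===== VERDICT (by name: the statement is the Claim_ definition above) =====
theorem formatIndex_spec : Claim_equal_formatIndex := by
  intro index _
  unfold Spec_formatIndex formatIndex formatIndex_alt
  set lines := (PySem.Str.split? index "\n").getD [] with hl
  have h3 := PySem.List.foldl_append_if pvHasCell id
      (pvLoopClose (pvLoopTable lines 0) 0) []
  simp only [id, List.map_id, List.nil_append] at h3
  rw [h3, pvLoopTable_eq, pvLoopClose_eq]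
  simp only [List.drop_zero, List.take_zero, List.nil_append]
  cases h : lines.any pvHasOpen with
  | true =>
    rw [if_pos rfl]
    simp only [Bool.not_true]
    rw [pvScan_false lines h, pvScan_true]
  | false =>
    rw [if_neg (by simp)]
    simp only [Bool.not_false]
    rw [pvScan_true]
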